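-- pv_equiv track=rewrite | github.com/bozzfozz/soulspot | src/soulspot/application/services/deduplication_housekeeping.py | _count_duplicate_groups_by_key
-- ===== SOURCE A (Python) =====
-- def _count_duplicate_groups_by_key(
--     items: list[tuple[int, str]]
-- ) -> int:
--     """Count groups where key matches multiple items."""
--     key_to_ids: dict[str, list[int]] = {}
--     for item_id, key in items:
--         if key not in key_to_ids:
--             key_to_ids[key] = []
--         key_to_ids[key].append(item_id)
--
--     return sum(1 for ids in key_to_ids.values() if len(ids) > 1)
-- ===== SOURCE B (Python) =====
-- def _count_duplicate_groups_by_key(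
--     items: list[tuple[int, str]]
-- ) -> int:
--     """Count groups where key matches multiple items (sort a copy of the keys, count runs)."""
--     keys = sorted(key for _, key in items)
--     groups = 0
--     while keys:
--         k = keys[0]
--         run = 1
--         while run < len(keys) and keys[run] == k:
--             run += 1
--         if run > 1:
--             groups += 1
--         keys = keys[run:]
--     return groups
-- ===== Notes on version B (the rewrite author's own statement) =====
-- stated objective: alternative
-- what changed: Replaces dict-based grouping of ids per key with sorting a fresh list of the keys and counting runs of length > 1 in one scan over the sorted list.
import Mathlib
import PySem

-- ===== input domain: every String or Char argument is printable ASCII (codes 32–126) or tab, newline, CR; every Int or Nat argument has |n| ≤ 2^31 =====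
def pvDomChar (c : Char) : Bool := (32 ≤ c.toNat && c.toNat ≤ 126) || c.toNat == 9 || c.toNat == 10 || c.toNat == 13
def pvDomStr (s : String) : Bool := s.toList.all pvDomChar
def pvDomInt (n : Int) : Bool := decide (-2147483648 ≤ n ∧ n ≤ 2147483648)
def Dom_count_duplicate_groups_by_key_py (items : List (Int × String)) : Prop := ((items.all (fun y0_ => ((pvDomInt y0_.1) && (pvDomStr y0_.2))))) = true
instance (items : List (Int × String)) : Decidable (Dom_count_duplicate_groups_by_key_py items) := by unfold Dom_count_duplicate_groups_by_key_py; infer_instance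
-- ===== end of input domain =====

-- B replaces A's dict grouping of ids per key by sorting a fresh copy of the keys and counting runs longer than 1 (objective: alternative algorithm, similar cost).

-- ===== PORT A =====
def count_duplicate_groups_by_key_py (items : List (Int × String)) : Int :=
  let key_to_ids : PySem.Dict String (List Int) :=
    items.foldl (fun d p =>
      let d := if d.contains p.2 then d else d.insert p.2 []
      d.insert p.2 (d.getD p.2 [] ++ [p.1])) PySem.Dict.empty
  (key_to_ids.values.map (fun ids => if 1 < ids.length then (1 : Int) else 0)).sum

-- ===== PORT B =====
-- Source B's outer while loop: measure the run of the head key (the inner while is the takeWhile), then continue after it (keys = keys[run:])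
def pvRunCount : List String → Int
  | [] => 0
  | k :: t =>
    let run := 1 + (t.takeWhile (fun x => x == k)).length
    (if run > 1 then (1 : Int) else 0) + pvRunCount (t.dropWhile (fun x => x == k))
termination_by l => l.length
decreasing_by
  exact Nat.lt_succ_of_le (List.length_dropWhile_le _ _)

def count_duplicate_groups_by_key_py_alt (items : List (Int × String)) : Int :=
  pvRunCount (PySem.List.sorted (items.map (fun p => p.2)) (fun x => x) false)

-- ===== PRECONDITION & SPEC =====
def Spec_count_duplicate_groups_by_key_py (items : List (Int × String)) (out : Int) : Prop := out = count_duplicate_groups_by_key_py_alt items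
instance (items : List (Int × String)) (out : Int) : Decidable (Spec_count_duplicate_groups_by_key_py items out) := by unfold Spec_count_duplicate_groups_by_key_py; infer_instance

-- ===== CLAIM (what is proved, stated in full; the proofs are below) =====
def Claim_equal_count_duplicate_groups_by_key_py : Prop := ∀ (items : List (Int × String)), Dom_count_duplicate_groups_by_key_py items → Spec_count_duplicate_groups_by_key_py items (count_duplicate_groups_by_key_py items)

-- ===== LEMMAS AND PROOFS =====

-- the common value both ports compute: the number of distinct keys occurring more than once
def pvSpecCount (keys : List String) : Nat :=
  (keys.toFinset.filter (fun k => 1 < keys.count k)).card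

theorem pvSpecCount_perm (l l' : List String) (h : l.Perm l') : pvSpecCount l = pvSpecCount l' := by
  unfold pvSpecCount
  rw [List.toFinset_eq_of_perm _ _ h]
  congr 1
  apply Finset.filter_congr
  intro x _
  rw [h.count_eq]

-- a 0/1-sum over the distinct keys is pvSpecCount
theorem pvSum_ofList (keys : List String) :
    ((PySem.Set.ofList keys).map (fun k => if 1 < keys.count k then (1 : Int) else 0)).sum
    = (pvSpecCount keys : Int) := by
  have h01 := PySem.List.sum_map_ite_one_zero (fun k => decide (1 < keys.count k)) (PySem.Set.ofList keys)
  simp only [decide_eq_true_eq] at h01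
  rw [h01, List.countP_eq_length_filter]
  have hnd : (PySem.Set.ofList keys).Nodup := PySem.Set.nodup_ofList keys
  rw [← List.toFinset_card_of_nodup (hnd.filter _), List.toFinset_filter]
  unfold pvSpecCount
  have : (PySem.Set.ofList keys).toFinset = keys.toFinset := by
    apply Finset.ext; intro a; simp [PySem.Set.mem_ofList]
  rw [this]
  simp

-- A's loop body is dict.modify
theorem pvStep (d : PySem.Dict String (List Int)) (p : Int × String) :
    (let d' := if d.contains p.2 then d else d.insert p.2 []
     d'.insert p.2 (d'.getD p.2 [] ++ [p.1])) = d.modify p.2 [] (· ++ [p.1]) := by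
  by_cases h : d.contains p.2
  · simp [h, PySem.Dict.modify, PySem.Dict.getD_eq_get?_getD]
  · have h' : d.contains p.2 = false := by simpa using h
    simp [h, PySem.Dict.getD_insert_self, PySem.Dict.insert_insert_self,
      PySem.Dict.modify, PySem.Dict.getD_of_not_contains (h := h')]

theorem pvA_eq (items : List (Int × String)) :
    count_duplicate_groups_by_key_py items = (pvSpecCount (items.map (fun p => p.2)) : Int) := by
  show (((items.foldl (fun d p =>
        let d := if d.contains p.2 then d else d.insert p.2 []
        d.insert p.2 (d.getD p.2 [] ++ [p.1])) PySem.Dict.empty).values.map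
          (fun ids => if 1 < ids.length then (1 : Int) else 0)).sum) = _
  rw [PySem.List.foldl_congr_mem (g := fun d p => d.modify p.2 [] (· ++ [p.1]))
        (h := fun d p _ => pvStep d p)]
  have hswap : items.foldl (fun d p => d.modify p.2 [] (· ++ [p.1])) PySem.Dict.empty
      = (items.map (fun p => (p.2, p.1))).foldl (fun d p => d.modify p.1 [] (· ++ [p.2])) PySem.Dict.empty := by
    simp [List.foldl_map]
  rw [hswap]
  set keys := items.map (fun p => p.2) with hK
  set l := items.map (fun p => (p.2, p.1)) with hl
  set d := l.foldl (fun d p => d.modify p.1 [] (· ++ [p.2])) PySem.Dict.empty with hd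
  have hnd : d.keys.Nodup :=
    PySem.Dict.nodup_keys_foldl_modify_key l (fun p => p.1) [] (fun d p => (· ++ [p.2])) _ PySem.Dict.nodup_keys_empty
  have hkeys : d.keys = PySem.Set.ofList keys := by
    rw [hd, PySem.Dict.keys_foldl_modify_key]
    simp [PySem.Set.update, PySem.Set.ofList_eq_foldl, hl, hK, List.map_map, Function.comp_def]
  have hlen : ∀ c, (d.getD c []).length = keys.count c := by
    intro c
    rw [hd, PySem.Dict.getD_foldl_modify_append]
    simp only [hl, hK, List.length_map, List.length_append]
    rw [List.count_eq_countP]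
    simp only [← List.countP_eq_length_filter, List.countP_map, PySem.Dict.getD_empty,
      List.length_nil, Nat.zero_add]
    rfl
  have hvals : d.values = d.keys.map (fun k => d.getD k []) :=
    PySem.Dict.values_eq_map_keys d hnd []
  rw [hvals, hkeys, List.map_map]
  have hcong : ((PySem.Set.ofList keys).map ((fun ids => if 1 < ids.length then (1 : Int) else 0) ∘ fun k => d.getD k [])).sum
      = ((PySem.Set.ofList keys).map (fun k => if 1 < keys.count k then (1 : Int) else 0)).sum := by
    apply congrArg
    apply List.map_congr_left
    intro k _
    simp [Function.comp, hlen k]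
  rw [hcong, pvSum_ofList]

-- the run-count scan on a sorted list computes pvSpecCount
theorem pvRunCount_sorted : ∀ (l : List String), l.Pairwise (· ≤ ·) →
    pvRunCount l = (pvSpecCount l : Int) := by
  intro l
  induction l using pvRunCount.induct with
  | case1 => simp [pvRunCount, pvSpecCount]
  | case2 k t ih =>
    intro hs
    set a := t.takeWhile (fun x => x == k) with haDef
    set b := t.dropWhile (fun x => x == k) with hbDef
    have hab : a ++ b = t := List.takeWhile_append_dropWhile
    have hta : ∀ x ∈ a, x = k := by
      intro x hx
      simpa using List.mem_takeWhile_imp hx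
    have hkt : ∀ x ∈ t, k ≤ x := (List.pairwise_cons.mp hs).1
    have hbp : b.Pairwise (· ≤ ·) :=
      (List.pairwise_cons.mp hs).2.sublist (hab ▸ (List.sublist_append_right a b))
    have hkb : k ∉ b := by
      cases hb : b with
      | nil => simp
      | cons x b' =>
        have hhead := List.head?_dropWhile_not (fun x => x == k) t
        rw [← hbDef, hb] at hhead
        simp only [List.head?_cons] at hhead
        have hxk : x ≠ k := by simpa using hhead
        have hxmem : x ∈ t := by rw [← hab, hb]; simp
        have hkx : k < x := lt_of_le_of_ne (hkt x hxmem) (Ne.symm hxk)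
        intro hmem
        rcases List.mem_cons.mp hmem with h1 | h1
        · exact (ne_of_lt hkx) h1
        · rw [hb] at hbp
          have : x ≤ k := (List.pairwise_cons.mp hbp).1 k h1
          exact absurd (lt_of_lt_of_le hkx this) (lt_irrefl k)
    have hcountk : (k :: t).count k = 1 + a.length := by
      have hca : a.count k = a.length := List.count_eq_length.mpr (fun x hx => (hta x hx).symm)
      have hcb : b.count k = 0 := List.count_eq_zero.mpr hkb
      rw [← hab]
      simp [List.count_append, hca, hcb]
      omega
    have hcount' : ∀ k' ∈ b, (k :: t).count k' = b.count k' := by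
      intro k' hk'
      have hne : k' ≠ k := fun h => hkb (h ▸ hk')
      have hca : a.count k' = 0 := List.count_eq_zero.mpr (fun hx => hne (hta k' hx))
      rw [← hab]
      simp [List.count_append, hca, Ne.symm hne]
    have hfs : (k :: t).toFinset = insert k b.toFinset := by
      apply Finset.ext; intro x
      constructor
      · intro hx
        rcases List.mem_cons.mp (List.mem_toFinset.mp hx) with h | h
        · simp [h]
        · rw [← hab] at h
          rcases List.mem_append.mp h with h | h
          · simp [hta x h]
          · simp [List.mem_toFinset.mpr h]
      · intro hx
        rcases Finset.mem_insert.mp hx with h | h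
        · simp [h]
        · have : x ∈ t := by rw [← hab]; exact List.mem_append_right a (List.mem_toFinset.mp h)
          simp [this]
    have hknb : k ∉ b.toFinset := fun h => hkb (List.mem_toFinset.mp h)
    have hspec : pvSpecCount (k :: t)
        = (if 1 < (k :: t).count k then 1 else 0) + pvSpecCount b := by
      unfold pvSpecCount
      rw [hfs, Finset.filter_insert]
      have hcong : Finset.filter (fun k' => 1 < (k :: t).count k') b.toFinset
          = Finset.filter (fun k' => 1 < b.count k') b.toFinset := by
        apply Finset.filter_congr
        intro x hx
        rw [hcount' x (List.mem_toFinset.mp hx)]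
      split_ifs with h
      · rw [Finset.card_insert_of_notMem (fun hmem => hknb (Finset.mem_filter.mp hmem).1), hcong]
        omega
      · rw [hcong]
        omega
    rw [pvRunCount, hspec, ih hbp, hcountk]
    split_ifs with h
    · push_cast; ring
    · push_cast; ring

theorem pvB_eq (items : List (Int × String)) :
    count_duplicate_groups_by_key_py_alt items = (pvSpecCount (items.map (fun p => p.2)) : Int) := by
  unfold count_duplicate_groups_by_key_py_alt
  rw [pvRunCount_sorted _ (PySem.List.sorted_pairwise (items.map (fun p => p.2)) (fun x => x))]
  rw [pvSpecCount_perm _ _ (PySem.List.sorted_perm (items.map (fun p => p.2)) (fun x => x) false)]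

-- ===== VERDICT (by name: the statement is the Claim_ definition above) =====
theorem count_duplicate_groups_by_key_py_spec : Claim_equal_count_duplicate_groups_by_key_py := by
  intro items _
  unfold Spec_count_duplicate_groups_by_key_py
  rw [pvA_eq, pvB_eq]
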